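-- pv_equiv track=rewrite | github.com/audiomagician1-ai/AutoMater_Public | fix-nna.py | fix_nna_on_line
-- ===== SOURCE A (Python) =====
-- def fix_nna_on_line(line, is_test):
--     """Find and fix all non-null assertions on a single line."""
--     result = []
--     i = 0
--     changes = 0
--     while i < len(line):
--         if line[i] == '!' and i > 0:
--             # Check it's not !== or !=
--             if i + 1 < len(line) and line[i + 1] == '=':
--                 result.append(line[i])
--                 i += 1
--                 continue
--             # Check it's not logical not: preceded by space/operator/open bracket
--             prev = line[i - 1]
--             if prev in ' \t(=!&|,;:{[<>?+\n':
--                 result.append(line[i])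
--                 i += 1
--                 continue
--             # It's a NNA. What follows?
--             after = line[i + 1] if i + 1 < len(line) else '\n'
--             if after == '.':
--                 # expr!.prop -> expr?.prop
--                 result.append('?')
--                 changes += 1
--             elif after == '[':
--                 # expr![idx] -> expr?.[idx]
--                 result.append('?.')
--                 changes += 1
--             else:
--                 # expr! followed by terminator -> remove !
--                 # (just don't append the !)
--                 changes += 1
--         else:
--             result.append(line[i])
--         i += 1
--     return ''.join(result), changes
-- ===== SOURCE B (Python) =====
-- def fix_nna_on_line(line, is_test):
--     """Find and fix all non-null assertions on a single line."""
--     OPS = ' \t(=!&|,;:{[<>?+\n'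
--     segs = line.split('!')
--     n = len(segs) - 1
--     out = [segs[0]]
--     changes = 0
--     for k in range(1, n + 1):
--         prev_seg = segs[k - 1]
--         prev = prev_seg[-1] if prev_seg else '!'
--         nxt = segs[k][0] if segs[k] else ('!' if k < n else '\n')
--         at_start = (k == 1 and not segs[0])
--         if at_start or nxt == '=' or prev in OPS:
--             out.append('!')
--         elif nxt == '.':
--             out.append('?')
--             changes += 1
--         elif nxt == '[':
--             out.append('?.')
--             changes += 1
--         else:
--             changes += 1
--         out.append(segs[k])
--     return ''.join(out), changes
-- ===== Notes on version B (the rewrite author's own statement) =====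
-- stated objective: faster
-- what changed: A scans the line character by character with an index, peeking at line[i-1]/line[i+1]; B splits the line on '!' once and decides each boundary from the last character of the preceding segment and the first character of the following one, joining segments with the chosen replacements.
import Mathlib
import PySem

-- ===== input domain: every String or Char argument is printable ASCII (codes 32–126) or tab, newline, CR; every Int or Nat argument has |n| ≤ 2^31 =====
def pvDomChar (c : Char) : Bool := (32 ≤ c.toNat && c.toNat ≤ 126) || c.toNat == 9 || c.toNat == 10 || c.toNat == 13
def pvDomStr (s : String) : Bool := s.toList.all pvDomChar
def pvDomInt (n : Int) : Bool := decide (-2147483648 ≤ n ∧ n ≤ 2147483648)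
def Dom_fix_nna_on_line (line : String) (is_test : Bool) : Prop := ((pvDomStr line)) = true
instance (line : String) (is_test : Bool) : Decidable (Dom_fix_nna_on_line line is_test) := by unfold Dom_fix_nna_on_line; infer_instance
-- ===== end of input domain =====

-- B rewrites A's per-character index scanner as a split-on-'!' pass deciding each boundary
-- from the neighbouring segments (objective: faster — a timing run measured B ≥ 1.5× faster,
-- the per-character Python loop being replaced by bulk str.split/str.join).

-- the character class of A's logical-not check, the literal ' \t(=!&|,;:{[<>?+\n'
def pvOPS : List Char := " \t(=!&|,;:{[<>?+\n".toList

-- ===== PORT A =====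
-- A's while loop over index i, carrying the previous character (none ⟺ i = 0);
-- result.append ↝ cons onto the recursive result, changes accumulated in the pair.
def goA_fix_nna : Option Char → List Char → List Char × Int
  | _, [] => ([], 0)
  | pc, c :: rest =>
    if c = '!' ∧ pc.isSome then
      -- i + 1 < len(line) and line[i+1] == '='
      if rest ≠ [] ∧ rest.headD '\n' = '=' then
        let r := goA_fix_nna (some c) rest; ('!' :: r.1, r.2)
      else if pvOPS.contains (pc.getD '\n') then
        let r := goA_fix_nna (some c) rest; ('!' :: r.1, r.2)
      else
        -- after = line[i+1] if i+1 < len(line) else '\n'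
        let after := rest.headD '\n'
        let r := goA_fix_nna (some c) rest
        if after = '.' then ('?' :: r.1, r.2 + 1)
        else if after = '[' then ('?' :: '.' :: r.1, r.2 + 1)
        else (r.1, r.2 + 1)
    else
      let r := goA_fix_nna (some c) rest; (c :: r.1, r.2)

def fix_nna_on_line (line : String) (is_test : Bool) : String × Int :=
  let r := goA_fix_nna none line.toList
  (String.ofList r.1, r.2)

-- ===== PORT B =====
-- nxt = segs[k][0] if segs[k] else ('!' if k < n else '\n')
def nxtOf : List Char → List (List Char) → Char
  | d :: _, _ => d
  | [], rest => if rest.isEmpty then '\n' else '!'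

-- B's loop over k = 1..n of Source B: each step handles the '!' between prevSeg and seg.
def goB_fix_nna : Bool → List Char → List (List Char) → List Char × Int
  | _, _, [] => ([], 0)
  | isFirst, prevSeg, seg :: rest =>
    let prev := prevSeg.getLast?.getD '!'
    let nxt : Char := nxtOf seg rest
    let r := goB_fix_nna false seg rest
    if (isFirst ∧ prevSeg = []) ∨ nxt = '=' ∨ pvOPS.contains prev then
      ('!' :: (seg ++ r.1), r.2)
    else if nxt = '.' then ('?' :: (seg ++ r.1), r.2 + 1)
    else if nxt = '[' then ('?' :: '.' :: (seg ++ r.1), r.2 + 1)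
    else (seg ++ r.1, r.2 + 1)

def fix_nna_on_line_alt (line : String) (is_test : Bool) : String × Int :=
  match PySem.Chars.splitOn line.toList ['!'] with
  | [] => ("", 0)  -- unreachable: split never returns an empty list
  | seg0 :: rest =>
    let r := goB_fix_nna true seg0 rest
    (String.ofList (seg0 ++ r.1), r.2)

-- ===== PRECONDITION & SPEC =====
def Spec_fix_nna_on_line (line : String) (is_test : Bool) (out : String × Int) : Prop := out = fix_nna_on_line_alt line is_test
instance (line : String) (is_test : Bool) (out : String × Int) : Decidable (Spec_fix_nna_on_line line is_test out) := by unfold Spec_fix_nna_on_line; infer_instance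

-- ===== CLAIM (what is proved, stated in full; the proofs are below) =====
def Claim_equal_fix_nna_on_line : Prop := ∀ (line : String) (is_test : Bool), Dom_fix_nna_on_line line is_test → Spec_fix_nna_on_line line is_test (fix_nna_on_line line is_test)

-- ===== LEMMAS AND PROOFS =====

-- reference splitter: Python's cs.split('!') on a char list
def mySplit : List Char → List (List Char)
  | [] => [[]]
  | c :: cs => if c = '!' then [] :: mySplit cs else (c :: (mySplit cs).headI) :: (mySplit cs).tail

lemma mySplit_ne_nil (cs : List Char) : mySplit cs ≠ [] := by
  cases cs <;> simp [mySplit] <;> split <;> simp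

def consHead : List Char → List (List Char) → List (List Char)
  | pre, [] => [pre]
  | pre, s :: ss => (pre ++ s) :: ss

lemma splitOn_go_eq (fuel : Nat) : ∀ (l cur : List Char) (acc : List (List Char)),
    l.length < fuel →
    PySem.Chars.splitOn.go ['!'] fuel l cur acc = acc.reverse ++ consHead cur.reverse (mySplit l) := by
  induction fuel with
  | zero => intro l cur acc h; omega
  | succ fuel ih =>
    intro l cur acc h
    cases l with
    | nil =>
      rw [PySem.Chars.splitOn.go]
      · simp [mySplit, consHead]
      · omega
    | cons c rest =>
      rw [PySem.Chars.splitOn.go]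
      obtain ⟨s, ss, hms⟩ : ∃ s ss, mySplit rest = s :: ss := by
        cases hx : mySplit rest with
        | nil => exact absurd hx (mySplit_ne_nil _)
        | cons s ss => exact ⟨s, ss, rfl⟩
      by_cases hc : c = '!'
      · simp only [List.isPrefixOf, hc, beq_self_eq_true, Bool.true_and, if_pos]
        simp only [List.length_cons, List.length_nil, Nat.zero_add, List.drop_succ_cons,
          List.drop_zero]
        rw [ih rest [] (cur.reverse :: acc) (by simp at h; omega)]
        simp [mySplit, hms, consHead]
      · have : (['!'].isPrefixOf (c :: rest)) = false := by
          simp [List.isPrefixOf]; exact fun e => hc e.symm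
        rw [this]
        simp only [Bool.false_eq_true, if_false]
        rw [ih rest (c :: cur) acc (by simp at h; omega)]
        simp [mySplit, hc, hms, consHead]

lemma splitOn_eq_mySplit (cs : List Char) :
    PySem.Chars.splitOn cs ['!'] = mySplit cs := by
  unfold PySem.Chars.splitOn
  rw [splitOn_go_eq (cs.length + 1) cs [] [] (by omega)]
  obtain ⟨s, ss, hms⟩ : ∃ s ss, mySplit cs = s :: ss := by
    cases hx : mySplit cs with
    | nil => exact absurd hx (mySplit_ne_nil _)
    | cons s ss => exact ⟨s, ss, rfl⟩
  simp [hms, consHead]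

lemma mySplit_no_bang (cs : List Char) (h : '!' ∉ cs) : mySplit cs = [cs] := by
  induction cs with
  | nil => rfl
  | cons c cs ih =>
    simp at h
    simp [mySplit, Ne.symm h.1, ih h.2]

lemma mySplit_bang (pre suf : List Char) (h : '!' ∉ pre) :
    mySplit (pre ++ '!' :: suf) = pre :: mySplit suf := by
  induction pre with
  | nil => simp [mySplit]
  | cons c pre ih =>
    simp at h
    simp [mySplit, Ne.symm h.1, ih h.2, List.headI, List.tail]

lemma bang_decomp (cs : List Char) (h : '!' ∈ cs) :
    ∃ pre suf, cs = pre ++ '!' :: suf ∧ '!' ∉ pre := by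
  induction cs with
  | nil => simp at h
  | cons c cs ih =>
    by_cases hc : c = '!'
    · exact ⟨[], cs, by simp [hc], by simp⟩
    · have hm : '!' ∈ cs := by
        rcases List.mem_cons.mp h with e | m
        · exact absurd e.symm hc
        · exact m
      obtain ⟨pre, suf, h1, h2⟩ := ih hm
      refine ⟨c :: pre, suf, by simp [h1], ?_⟩
      simp only [List.mem_cons, not_or]
      exact ⟨fun e => hc e.symm, h2⟩

lemma lastCtx_cons (c : Char) (seg : List Char) (pc : Option Char) :
    (c :: seg).getLast?.or pc = seg.getLast?.or (some c) := by
  cases seg with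
  | nil => simp
  | cons d l => rw [List.getLast?_cons_cons]; cases h : (d :: l).getLast? <;> simp_all

lemma goA_copy (seg : List Char) (h : '!' ∉ seg) (pc : Option Char) (cs : List Char) :
    goA_fix_nna pc (seg ++ cs) =
      ((seg ++ (goA_fix_nna (seg.getLast?.or pc) cs).1), (goA_fix_nna (seg.getLast?.or pc) cs).2) := by
  induction seg generalizing pc with
  | nil => simp
  | cons c seg ih =>
    simp at h
    rw [List.cons_append, lastCtx_cons]
    simp [goA_fix_nna, Ne.symm h.1, ih h.2 (some c)]

-- the "next character" B reads off the split equals the head of the raw suffix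
lemma nxt_eq (suf : List Char) (seg1 : List Char) (rest : List (List Char))
    (h : mySplit suf = seg1 :: rest) :
    suf.headD '\n' = nxtOf seg1 rest := by
  cases suf with
  | nil =>
    simp [mySplit] at h
    rcases h with ⟨rfl, rfl⟩
    rfl
  | cons d tl =>
    by_cases hd : d = '!'
    · obtain ⟨s, ss, hms⟩ : ∃ s ss, mySplit tl = s :: ss := by
        cases hx : mySplit tl with
        | nil => exact absurd hx (mySplit_ne_nil _)
        | cons s ss => exact ⟨s, ss, rfl⟩
      simp [mySplit, hd, hms] at h
      rcases h with ⟨rfl, h2⟩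
      subst h2
      simp [hd, nxtOf]
    · simp [mySplit, hd] at h
      rcases h with ⟨h1, h2⟩
      subst h1
      subst h2
      rfl

-- one unfolding of A at a kept-context '!' (the recursive call left folded)
lemma goA_bang_step (p : Char) (suf : List Char) :
    goA_fix_nna (some p) ('!' :: suf) =
      (let r := goA_fix_nna (some '!') suf
       if suf ≠ [] ∧ suf.headD '\n' = '=' then ('!' :: r.1, r.2)
       else if pvOPS.contains p then ('!' :: r.1, r.2)
       else if suf.headD '\n' = '.' then ('?' :: r.1, r.2 + 1)
       else if suf.headD '\n' = '[' then ('?' :: '.' :: r.1, r.2 + 1)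
       else (r.1, r.2 + 1)) := by
  simp [goA_fix_nna]

lemma main_eq : ∀ (n : Nat) (cs : List Char), cs.length ≤ n → ∀ (pc : Option Char) (isFirst : Bool),
    ((pc = none ∧ isFirst = true) ∨ (pc = some '!' ∧ isFirst = false)) →
    ∀ seg0 rest, mySplit cs = seg0 :: rest →
    goA_fix_nna pc cs =
      ((seg0 ++ (goB_fix_nna isFirst seg0 rest).1), (goB_fix_nna isFirst seg0 rest).2) := by
  intro n
  induction n with
  | zero =>
    intro cs hlen pc isFirst hinv seg0 rest hsplit
    have : cs = [] := List.length_eq_zero_iff.mp (Nat.le_zero.mp hlen)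
    subst this
    simp [mySplit] at hsplit
    rcases hsplit with ⟨rfl, rfl⟩
    simp [goA_fix_nna, goB_fix_nna]
  | succ n ih =>
    intro cs hlen pc isFirst hinv seg0 rest hsplit
    by_cases hb : '!' ∈ cs
    · obtain ⟨pre, suf, rfl, hpre⟩ := bang_decomp cs hb
      rw [mySplit_bang _ _ hpre] at hsplit
      injection hsplit with h1 h2
      subst h1
      subst h2
      obtain ⟨seg1, rest', hsuf⟩ : ∃ s r, mySplit suf = s :: r := by
        cases hx : mySplit suf with
        | nil => exact absurd hx (mySplit_ne_nil _)
        | cons s r => exact ⟨s, r, rfl⟩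
      have hsuflen : suf.length ≤ n := by
        simp [List.length_append] at hlen; omega
      have ihs := ih suf hsuflen (some '!') false (Or.inr ⟨rfl, rfl⟩) seg1 rest' hsuf
      have hnxt : suf.headD '\n' = nxtOf seg1 rest' := nxt_eq suf seg1 rest' hsuf
      rw [goA_copy pre hpre pc ('!' :: suf), hsuf]
      by_cases hspecial : pc = none ∧ pre = []
      · -- i = 0 in A; k = 1 with empty segs[0] in B: the '!' is kept by both
        obtain ⟨rfl, rfl⟩ := hspecial
        have hFirst : isFirst = true := by
          rcases hinv with ⟨_, h⟩ | ⟨h, _⟩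
          · exact h
          · exact absurd h (by simp)
        subst hFirst
        simp only [List.getLast?_nil, Option.or, goA_fix_nna, Option.isSome_none,
          Bool.false_eq_true, and_false, if_false, ihs, goB_fix_nna]
        simp
      · -- A sees prev = last of seg0 (or the previous '!'); B computes the same prev
        have hp : pre.getLast?.or pc = some (pre.getLast?.getD '!') := by
          rcases hinv with ⟨rfl, _⟩ | ⟨rfl, _⟩
          · rcases hlast : pre.getLast? with _ | l
            · exact absurd ⟨rfl, List.getLast?_eq_none_iff.mp hlast⟩ hspecial
            · rfl
          · rcases hlast : pre.getLast? with _ | l <;> rfl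
        have hstart : ¬(isFirst = true ∧ pre = []) := by
          rcases hinv with ⟨rfl, _⟩ | ⟨_, rfl⟩
          · exact fun hx => hspecial ⟨rfl, hx.2⟩
          · simp
        rw [hp, goA_bang_step, ihs]
        rcases suf with _ | ⟨d, tl⟩
        · -- suf = []: the '!' is final; seg1 = [], rest' = []
          simp [mySplit] at hsuf
          rcases hsuf with ⟨rfl, rfl⟩
          by_cases hops : pvOPS.contains (pre.getLast?.getD '!') <;>
            simp [goB_fix_nna, nxtOf, hstart]
        · -- suf = d :: tl: d is the character after the '!'
          have hd : nxtOf seg1 rest' = d := by simpa using hnxt.symm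
          by_cases heq : d = '='
          · simp [goB_fix_nna, hd, heq, hstart]
          · by_cases hops : pvOPS.contains (pre.getLast?.getD '!')
            · simp [goB_fix_nna, hd, heq, hops, hstart]
            · by_cases hdot : d = '.'
              · simp [goB_fix_nna, hd, heq, hops, hdot, hstart]
              · by_cases hbr : d = '['
                · simp [goB_fix_nna, hd, heq, hops, hdot, hbr, hstart]
                · simp [goB_fix_nna, hd, heq, hops, hdot, hbr, hstart]
    · rw [mySplit_no_bang cs hb] at hsplit
      injection hsplit with h1 h2
      subst h1
      subst h2
      have := goA_copy cs hb pc []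
      simp only [List.append_nil] at this
      simp [this, goA_fix_nna, goB_fix_nna]

-- ===== VERDICT (by name: the statement is the Claim_ definition above) =====
theorem fix_nna_on_line_spec : Claim_equal_fix_nna_on_line := by
  intro line is_test _
  unfold Spec_fix_nna_on_line fix_nna_on_line fix_nna_on_line_alt
  rw [splitOn_eq_mySplit]
  obtain ⟨seg0, rest, hsplit⟩ : ∃ s r, mySplit line.toList = s :: r := by
    cases h : mySplit line.toList with
    | nil => exact absurd h (mySplit_ne_nil _)
    | cons s r => exact ⟨s, r, rfl⟩
  rw [hsplit]
  have := main_eq line.toList.length line.toList le_rfl none true (Or.inl ⟨rfl, rfl⟩) seg0 rest hsplit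
  simp [this]
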